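-- pv_equiv track=rewrite | github.com/rlatkd/1day-1commit | python/algorithm/프로그래머스/1/133502. 햄버거 만들기/햄버거 만들기.py | solution
-- ===== SOURCE A (Python) =====
-- def solution(ingredient):
--     answer = 0
--     curr = ""
--     for i in range(len(ingredient)) :
--         curr += str(ingredient[i])
--
--         if len(curr) >= 4 and curr[len(curr) - 4: ] == "1231" :
--             curr = curr[ : len(curr) - 4]
--             answer += 1
--
--     return answer
-- ===== SOURCE B (Python) =====
-- def solution(ingredient):
--     # Keeps only the longest '123'-suffix of A's accumulated string; any other
--     # character can never be part of a "1231" match, so it resets the state.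
--     answer = 0
--     top = ""
--     for x in ingredient:
--         for ch in str(x):
--             top = top + ch if ch in "123" else ""
--         if top.endswith("1231"):
--             top = top[:-4]
--             answer += 1
--     return answer
-- ===== Notes on version B (the rewrite author's own statement) =====
-- stated objective: alternative
-- what changed: Instead of accumulating the whole concatenated digit string and comparing/truncating via slices once per element, B maintains only the longest suffix made of characters '1','2','3' (any other character resets the state, since it can never take part in a "1231" match) and checks with endswith; the unbounded history string A keeps is never stored.
import Mathlib
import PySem

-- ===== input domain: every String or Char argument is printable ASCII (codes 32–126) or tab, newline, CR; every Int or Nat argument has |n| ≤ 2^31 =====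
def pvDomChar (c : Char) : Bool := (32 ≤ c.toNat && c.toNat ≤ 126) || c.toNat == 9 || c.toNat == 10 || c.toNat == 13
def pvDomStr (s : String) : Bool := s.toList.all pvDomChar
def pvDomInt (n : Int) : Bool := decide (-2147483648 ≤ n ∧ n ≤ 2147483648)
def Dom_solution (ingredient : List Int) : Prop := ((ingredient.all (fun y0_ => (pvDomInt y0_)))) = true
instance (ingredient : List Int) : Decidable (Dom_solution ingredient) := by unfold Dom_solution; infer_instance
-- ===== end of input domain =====

-- B keeps only the longest '1'/'2'/'3'-suffix of A's accumulated string (other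
-- characters reset it, as they can never be part of a "1231" match): alternative
-- state, same cost.


-- ===== PORT A =====
def solution (ingredient : List Int) : Int :=
  ((PySem.List.pyRange 0 (ingredient.length : Int) 1).foldl
    (fun (st : Int × List Char) i =>
      let curr := st.2 ++ (PySem.Int.toStr (PySem.List.pyGetD ingredient i 0)).toList
      if 4 ≤ curr.length ∧
          PySem.List.slice curr (some ((curr.length : Int) - 4)) none = "1231".toList then
        (st.1 + 1, PySem.List.slice curr none (some ((curr.length : Int) - 4)))
      else
        (st.1, curr))
    ((0 : Int), ([] : List Char))).1

-- ===== PORT B =====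
def solution_alt (ingredient : List Int) : Int :=
  (ingredient.foldl
    (fun (st : Int × List Char) x =>
      let top := (PySem.Int.toStr x).toList.foldl
        (fun t ch => if "123".toList.contains ch then t ++ [ch] else []) st.2
      if PySem.Chars.endswith top "1231".toList then
        (st.1 + 1, PySem.List.slice top none (some (-4)))
      else
        (st.1, top))
    ((0 : Int), ([] : List Char))).1

-- ===== PRECONDITION & SPEC =====
def Spec_solution (ingredient : List Int) (out : Int) : Prop := out = solution_alt ingredient
instance (ingredient : List Int) (out : Int) : Decidable (Spec_solution ingredient out) := by unfold Spec_solution; infer_instance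

-- ===== CLAIM (what is proved, stated in full; the proofs are below) =====
def Claim_equal_solution : Prop := ∀ (ingredient : List Int), Dom_solution ingredient → Spec_solution ingredient (solution ingredient)


-- ===== LEMMAS AND PROOFS =====

-- A's loop body, as a function of the current element
def stepA (st : Int × List Char) (x : Int) : Int × List Char :=
  if 4 ≤ (st.2 ++ (PySem.Int.toStr x).toList).length ∧
      PySem.List.slice (st.2 ++ (PySem.Int.toStr x).toList)
        (some (((st.2 ++ (PySem.Int.toStr x).toList).length : Int) - 4)) none = "1231".toList then
    (st.1 + 1, PySem.List.slice (st.2 ++ (PySem.Int.toStr x).toList) none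
      (some (((st.2 ++ (PySem.Int.toStr x).toList).length : Int) - 4)))
  else
    (st.1, st.2 ++ (PySem.Int.toStr x).toList)

-- B's loop body
def stepB (st : Int × List Char) (x : Int) : Int × List Char :=
  if PySem.Chars.endswith ((PySem.Int.toStr x).toList.foldl
      (fun t ch => if "123".toList.contains ch then t ++ [ch] else []) st.2) "1231".toList then
    (st.1 + 1, PySem.List.slice ((PySem.Int.toStr x).toList.foldl
      (fun t ch => if "123".toList.contains ch then t ++ [ch] else []) st.2) none (some (-4)))
  else
    (st.1, (PySem.Int.toStr x).toList.foldl
      (fun t ch => if "123".toList.contains ch then t ++ [ch] else []) st.2)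

-- the longest suffix consisting of '1','2','3' only
def sfx (l : List Char) : List Char :=
  (l.reverse.takeWhile (fun c => "123".toList.contains c)).reverse

lemma sfx_append_singleton (a : List Char) (c : Char) :
    sfx (a ++ [c]) = if "123".toList.contains c then sfx a ++ [c] else [] := by
  unfold sfx
  rw [List.reverse_append]
  simp only [List.reverse_cons, List.reverse_nil, List.nil_append, List.singleton_append,
    List.takeWhile_cons]
  split_ifs with h
  · simp
  · simp

lemma sfx_foldl (c : List Char) : ∀ (a : List Char),
    c.foldl (fun t ch => if "123".toList.contains ch then t ++ [ch] else []) (sfx a)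
      = sfx (a ++ c) := by
  induction c with
  | nil => intro a; simp
  | cons ch c ih =>
      intro a
      rw [List.foldl_cons]
      have h1 : (if "123".toList.contains ch then sfx a ++ [ch] else []) = sfx (a ++ [ch]) :=
        (sfx_append_singleton a ch).symm
      show List.foldl _ (if "123".toList.contains ch then sfx a ++ [ch] else []) c = _
      rw [h1, ih (a ++ [ch]), List.append_assoc, List.singleton_append]

lemma sfx_suffix (a : List Char) : sfx a <:+ a := by
  have h := List.takeWhile_prefix (l := a.reverse) (p := fun c => "123".toList.contains c)
  have h2 := h.reverse
  simpa [sfx] using h2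

lemma sfx_append_all (w : List Char) (hw : w.all (fun c => "123".toList.contains c)) :
    ∀ u, sfx (u ++ w) = sfx u ++ w := by
  induction w with
  | nil => simp
  | cons ch w ih =>
      intro u
      simp only [List.all_cons, Bool.and_eq_true] at hw
      have h2 := ih hw.2 (u ++ [ch])
      rw [List.append_assoc, List.singleton_append] at h2
      rw [h2, sfx_append_singleton, if_pos hw.1, List.append_assoc, List.singleton_append]

lemma suffix_iff_suffix_sfx (a : List Char) :
    ("1231".toList <:+ a) ↔ ("1231".toList <:+ sfx a) := by
  constructor
  · rintro ⟨u, rfl⟩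
    rw [sfx_append_all "1231".toList (by decide) u]
    exact List.suffix_append _ _
  · intro h
    exact h.trans (sfx_suffix a)

lemma condA_iff (a : List Char) :
    (4 ≤ a.length ∧
      PySem.List.slice a (some ((a.length : Int) - 4)) none = "1231".toList)
    ↔ ("1231".toList <:+ a) := by
  constructor
  · rintro ⟨h4, hs⟩
    rw [PySem.List.slice_from (xs := a) (a := (a.length : Int) - 4) (by omega)] at hs
    exact hs ▸ List.drop_suffix _ _
  · rintro ⟨u, rfl⟩
    have h4 : 4 ≤ (u ++ "1231".toList).length := by simp
    refine ⟨h4, ?_⟩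
    rw [PySem.List.slice_from (xs := u ++ "1231".toList)
      (a := ((u ++ "1231".toList).length : Int) - 4) (by omega)]
    have hn : ((((u ++ "1231".toList).length : Int)) - 4).toNat = u.length := by
      simp
    rw [hn]
    simp

lemma stepAB (ans : Int) (c : List Char) (x : Int) :
    stepB (ans, sfx c) x = ((stepA (ans, c) x).1, sfx (stepA (ans, c) x).2) := by
  unfold stepA stepB
  rw [sfx_foldl]
  by_cases h : "1231".toList <:+ (c ++ (PySem.Int.toStr x).toList)
  · have hB : PySem.Chars.endswith (sfx (c ++ (PySem.Int.toStr x).toList)) "1231".toList = true :=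
      (PySem.Chars.endswith_iff _ _).mpr ((suffix_iff_suffix_sfx _).mp h)
    have hA := (condA_iff (c ++ (PySem.Int.toStr x).toList)).mpr h
    rw [if_pos hA, if_pos hB]
    obtain ⟨u, hu⟩ := h
    rw [← hu]
    have hsfx : sfx (u ++ "1231".toList) = sfx u ++ "1231".toList :=
      sfx_append_all "1231".toList (by decide) u
    have hA2 : PySem.List.slice (u ++ "1231".toList) none
        (some (((u ++ "1231".toList).length : Int) - 4)) = u := by
      rw [PySem.List.slice_to (xs := u ++ "1231".toList)
        (b := ((u ++ "1231".toList).length : Int) - 4) (by simp)]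
      have hn : ((((u ++ "1231".toList).length : Int)) - 4).toNat = u.length := by
        simp
      rw [hn]
      simp
    have hB2 : PySem.List.slice (sfx (u ++ "1231".toList)) none (some (-4)) = sfx u := by
      rw [PySem.List.slice_to_neg_ofNat _ 4 (by omega), hsfx]
      have hl : (sfx u ++ "1231".toList).length - 4 = (sfx u).length := by simp
      rw [hl]
      simp
    rw [hA2, hB2]
  · have hB : ¬ PySem.Chars.endswith (sfx (c ++ (PySem.Int.toStr x).toList)) "1231".toList = true :=
      fun hcon => h ((suffix_iff_suffix_sfx _).mpr ((PySem.Chars.endswith_iff _ _).mp hcon))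
    have hA : ¬ (4 ≤ (c ++ (PySem.Int.toStr x).toList).length ∧
        PySem.List.slice (c ++ (PySem.Int.toStr x).toList)
          (some (((c ++ (PySem.Int.toStr x).toList).length : Int) - 4)) none = "1231".toList) :=
      fun hc => h ((condA_iff _).mp hc)
    rw [if_neg hA, if_neg hB]

lemma foldAB (l : List Int) : ∀ (ans : Int) (c : List Char),
    l.foldl stepB (ans, sfx c) = ((l.foldl stepA (ans, c)).1, sfx (l.foldl stepA (ans, c)).2) := by
  induction l with
  | nil => intro ans c; simp
  | cons x l ih =>
      intro ans c
      simp only [List.foldl_cons]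
      rw [stepAB ans c x]
      have := ih (stepA (ans, c) x).1 (stepA (ans, c) x).2
      simpa using this

lemma solution_eq_foldA (ingredient : List Int) :
    solution ingredient = (ingredient.foldl stepA ((0 : Int), ([] : List Char))).1 := by
  unfold solution
  exact congrArg Prod.fst
    (PySem.List.foldl_pyRange_zero_pyGetD' ingredient 0 stepA ((0 : Int), ([] : List Char)))

lemma solution_alt_eq_foldB (ingredient : List Int) :
    solution_alt ingredient = (ingredient.foldl stepB ((0 : Int), ([] : List Char))).1 := rfl

-- ===== VERDICT (by name: the statement is the Claim_ definition above) =====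
theorem solution_spec : Claim_equal_solution := by
  intro ingredient _
  unfold Spec_solution
  rw [solution_eq_foldA, solution_alt_eq_foldB]
  have h := foldAB ingredient 0 ([] : List Char)
  have hnil : sfx ([] : List Char) = [] := rfl
  rw [hnil] at h
  rw [h]
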